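-- pv_equiv track=rewrite | github.com/jamesben6688/coding | 模拟题/mirrow_vampire.py | find_embarrassed_vampires_fast
-- ===== SOURCE A (Python) =====
-- from collections import defaultdict
-- import bisect
--
-- def find_embarrassed_vampires_fast(vampires, mirrors, rows, cols):
--     vampire_set = set((r, c) for r, c in vampires)
--     mirror_map = dict()
--     for r, c, d in mirrors:
--         mirror_map[(r, c)] = d
--
--     embarrassed = defaultdict(set)
--
--     # For each row/col, keep sorted list of vampires and mirrors
--     row_map = defaultdict(lambda: {'v': [], 'm': []})
--     col_map = defaultdict(lambda: {'v': [], 'm': []})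
--
--     for r, c in vampire_set:
--         row_map[r]['v'].append(c)
--         col_map[c]['v'].append(r)
--     for (r, c) in mirror_map:
--         row_map[r]['m'].append(c)
--         col_map[c]['m'].append(r)
--
--     # Sort them
--     for r in row_map:
--         row_map[r]['v'].sort()
--         row_map[r]['m'].sort()
--     for c in col_map:
--         col_map[c]['v'].sort()
--         col_map[c]['m'].sort()
--
--     opp = {'N': 'S', 'S': 'N', 'E': 'W', 'W': 'E'}
--     direction_info = {
--         'N': (col_map, -1, 'v', 'm', lambda lst, x: bisect.bisect_left(lst, x) - 1, 'S'),
--         'S': (col_map, 1, 'v', 'm', lambda lst, x: bisect.bisect_right(lst, x), 'N'),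
--         'W': (row_map, -1, 'v', 'm', lambda lst, x: bisect.bisect_left(lst, x) - 1, 'E'),
--         'E': (row_map, 1, 'v', 'm', lambda lst, x: bisect.bisect_right(lst, x), 'W'),
--     }
--
--     for (r, c), d in mirror_map.items():
--         maps, step, vk, mk, finder, embarrass_dir = direction_info[d]
--
--         idx = finder(maps[r if d in 'EW' else c][vk], c if d in 'EW' else r)
--         m_idx = finder(maps[r if d in 'EW' else c][mk], c if d in 'EW' else r)
--
--         # Check who appears first
--         target_list = maps[r if d in 'EW' else c][vk]
--         blocker_list = maps[r if d in 'EW' else c][mk]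
--
--         vampire_pos = target_list[idx] if 0 <= idx < len(target_list) else None
--         mirror_pos = blocker_list[m_idx] if 0 <= m_idx < len(blocker_list) else None
--
--         if vampire_pos is not None:
--             if mirror_pos is None or \
--                (step == 1 and vampire_pos < mirror_pos) or \
--                (step == -1 and vampire_pos > mirror_pos):
--                 if d in 'NS':
--                     embarrassed[(vampire_pos, c)].add(embarrass_dir)
--                 else:
--                     embarrassed[(r, vampire_pos)].add(embarrass_dir)
--
--     return sorted((r, c, sorted(list(dirs))) for (r, c), dirs in embarrassed.items())
-- ===== SOURCE B (Python) =====
-- def find_embarrassed_vampires_fast(vampires, mirrors, rows, cols):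
--     # last direction wins per mirror position, first-insertion order (like dict)
--     mmap = {}
--     for r, c, d in mirrors:
--         mmap[(r, c)] = d
--     opp = {'N': 'S', 'S': 'N', 'E': 'W', 'W': 'E'}
--     embarrassed = {}
--     for (r, c), d in mmap.items():
--         if d in ('E', 'W'):
--             x = c
--             cand_v = [cc for (rr, cc) in vampires if rr == r]
--             cand_m = [cc for (rr, cc, _) in mirrors if rr == r]
--         else:
--             x = r
--             cand_v = [rr for (rr, cc) in vampires if cc == c]
--             cand_m = [rr for (rr, cc, _) in mirrors if cc == c]
--         if d in ('S', 'E'):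
--             vs = [p for p in cand_v if p > x]
--             ms = [p for p in cand_m if p > x]
--             v = min(vs) if vs else None
--             m = min(ms) if ms else None
--             hit = v is not None and (m is None or v < m)
--         else:
--             vs = [p for p in cand_v if p < x]
--             ms = [p for p in cand_m if p < x]
--             v = max(vs) if vs else None
--             m = max(ms) if ms else None
--             hit = v is not None and (m is None or v > m)
--         if hit:
--             cell = (r, v) if d in ('E', 'W') else (v, c)
--             embarrassed.setdefault(cell, set()).add(opp[d])
--     return sorted((r, c, sorted(dirs)) for (r, c), dirs in embarrassed.items())
-- ===== Notes on version B (the rewrite author's own statement) =====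
-- stated objective: simpler
-- what changed: B drops A's whole indexing machinery (per-row/column sorted lists plus bisect lookups) and instead, for each mirror, linearly filters its row/column for the nearest vampire and nearest blocking mirror strictly beyond it (min/max), building the same result.
-- outside the precondition, e.g. on find_embarrassed_vampires_fast([], [(0, 0, 'X'), (0, 0, 'N')], 1, 1): A returns [], B returns []
import Mathlib
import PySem

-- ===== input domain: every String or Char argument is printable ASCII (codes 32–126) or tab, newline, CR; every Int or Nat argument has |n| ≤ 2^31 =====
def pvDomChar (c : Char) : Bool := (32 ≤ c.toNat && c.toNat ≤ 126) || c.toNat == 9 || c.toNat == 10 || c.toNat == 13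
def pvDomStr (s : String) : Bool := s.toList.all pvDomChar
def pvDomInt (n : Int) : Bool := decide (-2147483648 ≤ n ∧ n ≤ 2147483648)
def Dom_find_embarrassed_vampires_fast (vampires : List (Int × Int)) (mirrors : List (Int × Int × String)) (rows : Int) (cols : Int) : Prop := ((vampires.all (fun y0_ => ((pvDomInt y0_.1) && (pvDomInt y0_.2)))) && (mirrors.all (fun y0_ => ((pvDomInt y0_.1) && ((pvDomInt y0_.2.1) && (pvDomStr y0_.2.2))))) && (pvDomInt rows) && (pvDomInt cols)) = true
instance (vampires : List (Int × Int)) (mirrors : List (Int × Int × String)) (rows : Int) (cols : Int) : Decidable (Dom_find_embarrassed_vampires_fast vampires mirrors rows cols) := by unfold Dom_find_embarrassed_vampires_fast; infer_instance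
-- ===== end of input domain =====

-- B replaces A's per-row/column sorted indexes + bisect machinery by a plain linear scan per
-- mirror (filter the mirror's row/column, take the min/max strictly beyond it): simpler, not faster.

-- ===== PORT A =====
-- A's row_map[r] = {'v': …, 'm': …} is modelled as two parallel Dicts (the 'v' and 'm' components);
-- all accesses are getD with default [] so splitting the inner dict is observation-equivalent.
def fevA_rowAppend (l : List (Int × Int)) : PySem.Dict Int (List Int) :=
  l.foldl (fun d p => d.modify p.1 [] (fun x => x ++ [p.2])) PySem.Dict.empty

def fevA_colAppend (l : List (Int × Int)) : PySem.Dict Int (List Int) :=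
  l.foldl (fun d p => d.modify p.2 [] (fun x => x ++ [p.1])) PySem.Dict.empty

-- the 'for r in row_map: row_map[r][…].sort()' pass: sort every stored list in place
def fevA_sortVals (d : PySem.Dict Int (List Int)) : PySem.Dict Int (List Int) :=
  d.keys.foldl (fun d' k => d'.modify k [] (fun l => PySem.List.sorted l (fun y => y) false)) d

-- the loop body shared by all four directions (A's direction_info table entry applied to one mirror);
-- target_list/blocker_list are the looked-up per-row/col sorted lists
def fevA_dir (target_list blocker_list : List Int) (x : Int) (step : Int)
    (mkCell : Int → Int × Int) (embarrass_dir : String)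
    (emb : PySem.Dict (Int × Int) (PySem.Set String)) : PySem.Dict (Int × Int) (PySem.Set String) :=
  let idx : Int := if step = 1 then (PySem.List.bisectRight target_list x : Int)
                   else (PySem.List.bisectLeft target_list x : Int) - 1
  let m_idx : Int := if step = 1 then (PySem.List.bisectRight blocker_list x : Int)
                     else (PySem.List.bisectLeft blocker_list x : Int) - 1
  let vampire_pos : Option Int :=
    if 0 ≤ idx ∧ idx < PySem.List.len target_list then PySem.List.pyGet? target_list idx else none
  let mirror_pos : Option Int :=
    if 0 ≤ m_idx ∧ m_idx < PySem.List.len blocker_list then PySem.List.pyGet? blocker_list m_idx else none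
  match vampire_pos, mirror_pos with
  | none, _ => emb
  | some vp, none => emb.modify (mkCell vp) PySem.Set.empty (fun s => PySem.Set.add s embarrass_dir)
  | some vp, some mp =>
      if (step = 1 ∧ vp < mp) ∨ (step = -1 ∧ mp < vp) then
        emb.modify (mkCell vp) PySem.Set.empty (fun s => PySem.Set.add s embarrass_dir)
      else emb

-- A's main loop body; the direction_info dict lookup is the if-chain (an unknown key raises
-- KeyError in Python — outside Pre_; the port skips such an entry)
def fevA_step (rowV rowM colV colM : PySem.Dict Int (List Int))
    (emb : PySem.Dict (Int × Int) (PySem.Set String)) (e : (Int × Int) × String) :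
    PySem.Dict (Int × Int) (PySem.Set String) :=
  if e.2 = "N" then
    fevA_dir (colV.getD e.1.2 []) (colM.getD e.1.2 []) e.1.1 (-1) (fun vp => (vp, e.1.2)) "S" emb
  else if e.2 = "S" then
    fevA_dir (colV.getD e.1.2 []) (colM.getD e.1.2 []) e.1.1 1 (fun vp => (vp, e.1.2)) "N" emb
  else if e.2 = "W" then
    fevA_dir (rowV.getD e.1.1 []) (rowM.getD e.1.1 []) e.1.2 (-1) (fun vp => (e.1.1, vp)) "E" emb
  else if e.2 = "E" then
    fevA_dir (rowV.getD e.1.1 []) (rowM.getD e.1.1 []) e.1.2 1 (fun vp => (e.1.1, vp)) "W" emb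
  else emb

def find_embarrassed_vampires_fast (vampires : List (Int × Int)) (mirrors : List (Int × Int × String)) (rows : Int) (cols : Int) : List (Int × Int × List String) :=
  let vampire_set : PySem.Set (Int × Int) := PySem.Set.ofList vampires
  let mirror_map : PySem.Dict (Int × Int) String :=
    mirrors.foldl (fun d t => d.insert (t.1, t.2.1) t.2.2) PySem.Dict.empty
  let rowV := fevA_sortVals (fevA_rowAppend vampire_set)
  let colV := fevA_sortVals (fevA_colAppend vampire_set)
  let rowM := fevA_sortVals (fevA_rowAppend mirror_map.keys)
  let colM := fevA_sortVals (fevA_colAppend mirror_map.keys)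
  let emb : PySem.Dict (Int × Int) (PySem.Set String) :=
    mirror_map.items.foldl (fevA_step rowV rowM colV colM) PySem.Dict.empty
  -- the (r, c) keys of emb are distinct, so Python's tuple sort never reaches the third component
  PySem.List.sorted2 (emb.items.map (fun p => (p.1.1, p.1.2, PySem.List.sorted p.2 (fun s => s) false)))
    (fun t => t.1) (fun t => t.2.1) false

-- ===== PORT B =====
def fevB_opp (d : String) : Option String :=
  if d = "N" then some "S" else if d = "S" then some "N"
  else if d = "E" then some "W" else if d = "W" then some "E" else none

-- B's loop body: linear scan of the mirror's row/column (opp[d] raises KeyError on an unknown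
-- direction in Python — outside Pre_; the port skips such an entry)
def fevB_step (vampires : List (Int × Int)) (mirrors : List (Int × Int × String))
    (emb : PySem.Dict (Int × Int) (PySem.Set String)) (e : (Int × Int) × String) :
    PySem.Dict (Int × Int) (PySem.Set String) :=
  let r := e.1.1; let c := e.1.2; let d := e.2
  let x : Int := if d = "E" ∨ d = "W" then c else r
  let cand_v : List Int :=
    if d = "E" ∨ d = "W" then (vampires.filter (fun p => p.1 == r)).map (fun p => p.2)
    else (vampires.filter (fun p => p.2 == c)).map (fun p => p.1)
  let cand_m : List Int :=
    if d = "E" ∨ d = "W" then (mirrors.filter (fun t => t.1 == r)).map (fun t => t.2.1)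
    else (mirrors.filter (fun t => t.2.1 == c)).map (fun t => t.1)
  let v : Option Int :=
    if d = "S" ∨ d = "E" then PySem.List.min? (cand_v.filter (fun p => x < p)) (fun y => y)
    else PySem.List.max? (cand_v.filter (fun p => p < x)) (fun y => y)
  let m : Option Int :=
    if d = "S" ∨ d = "E" then PySem.List.min? (cand_m.filter (fun p => x < p)) (fun y => y)
    else PySem.List.max? (cand_m.filter (fun p => p < x)) (fun y => y)
  let hit : Bool :=
    match v, m with
    | none, _ => false
    | some _, none => true
    | some vv, some mm => if d = "S" ∨ d = "E" then decide (vv < mm) else decide (mm < vv)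
  if hit then
    match fevB_opp d, v with
    | some dir, some vv =>
        emb.modify (if d = "E" ∨ d = "W" then (r, vv) else (vv, c)) PySem.Set.empty
          (fun s => PySem.Set.add s dir)
    | _, _ => emb
  else emb

def find_embarrassed_vampires_fast_alt (vampires : List (Int × Int)) (mirrors : List (Int × Int × String)) (rows : Int) (cols : Int) : List (Int × Int × List String) :=
  let mmap : PySem.Dict (Int × Int) String :=
    mirrors.foldl (fun d t => d.insert (t.1, t.2.1) t.2.2) PySem.Dict.empty
  let emb : PySem.Dict (Int × Int) (PySem.Set String) :=
    mmap.items.foldl (fevB_step vampires mirrors) PySem.Dict.empty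
  PySem.List.sorted2 (emb.items.map (fun p => (p.1.1, p.1.2, PySem.List.sorted p.2 (fun s => s) false)))
    (fun t => t.1) (fun t => t.2.1) false

-- ===== PRECONDITION & SPEC =====
-- Pre_ excludes inputs containing a mirror whose direction string is not one of N/S/E/W: on those
-- A raises KeyError (direction_info[d]); it thereby also excludes the corner where such an entry is
-- shadowed by a later mirror at the same position (A then still returns — see the cite in claim.json).
def Pre_find_embarrassed_vampires_fast (vampires : List (Int × Int)) (mirrors : List (Int × Int × String)) (rows : Int) (cols : Int) : Prop :=
  ∀ t ∈ mirrors, t.2.2 = "N" ∨ t.2.2 = "S" ∨ t.2.2 = "E" ∨ t.2.2 = "W"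
instance (vampires : List (Int × Int)) (mirrors : List (Int × Int × String)) (rows : Int) (cols : Int) : Decidable (Pre_find_embarrassed_vampires_fast vampires mirrors rows cols) := by unfold Pre_find_embarrassed_vampires_fast; infer_instance

def pvWitness_find_embarrassed_vampires_fast : (List (Int × Int)) × (List (Int × Int × String)) × Int × Int :=
  ([(0, 1), (2, 2)], [(2, 1, "N"), (0, 2, "S")], 3, 3)

def Spec_find_embarrassed_vampires_fast (vampires : List (Int × Int)) (mirrors : List (Int × Int × String)) (rows : Int) (cols : Int) (out : List (Int × Int × List String)) : Prop := out = find_embarrassed_vampires_fast_alt vampires mirrors rows cols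
instance (vampires : List (Int × Int)) (mirrors : List (Int × Int × String)) (rows : Int) (cols : Int) (out : List (Int × Int × List String)) : Decidable (Spec_find_embarrassed_vampires_fast vampires mirrors rows cols out) := by unfold Spec_find_embarrassed_vampires_fast; infer_instance

-- ===== CLAIM (what is proved, stated in full; the proofs are below) =====
def Claim_equal_find_embarrassed_vampires_fast : Prop := ∀ (vampires : List (Int × Int)) (mirrors : List (Int × Int × String)) (rows : Int) (cols : Int), Dom_find_embarrassed_vampires_fast vampires mirrors rows cols → Pre_find_embarrassed_vampires_fast vampires mirrors rows cols → Spec_find_embarrassed_vampires_fast vampires mirrors rows cols (find_embarrassed_vampires_fast vampires mirrors rows cols)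

-- ===== LEMMAS AND PROOFS =====

-- a fold that modifies each of a Nodup list of keys once applies f to each stored value once
lemma pv_getD_foldl_modify_once (ks : List Int) (hnd : ks.Nodup) (d : PySem.Dict Int (List Int))
    (f : List Int → List Int) (k : Int) :
    (ks.foldl (fun d' k' => d'.modify k' [] f) d).getD k [] =
      if k ∈ ks then f (d.getD k []) else d.getD k [] := by
  induction ks generalizing d with
  | nil => simp
  | cons a t ih =>
    rcases List.nodup_cons.mp hnd with ⟨ha, ht⟩
    rw [List.foldl_cons, ih ht, PySem.Dict.getD_modify]
    by_cases hkt : k ∈ t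
    · have hka : k ≠ a := fun h => ha (h ▸ hkt)
      simp [hkt, hka]
    · by_cases hka : k = a <;> simp [hkt, hka, ha]

lemma pv_nodup_keys_rowAppend (l : List (Int × Int)) : (fevA_rowAppend l).keys.Nodup := by
  unfold fevA_rowAppend
  exact PySem.Dict.nodup_keys_foldl_modify_key (l := l) (key := fun p => p.1) (d0 := [])
    (f := fun d p => fun x => x ++ [p.2]) (d := PySem.Dict.empty) PySem.Dict.nodup_keys_empty

lemma pv_nodup_keys_colAppend (l : List (Int × Int)) : (fevA_colAppend l).keys.Nodup := by
  unfold fevA_colAppend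
  exact PySem.Dict.nodup_keys_foldl_modify_key (l := l) (key := fun p => p.2) (d0 := [])
    (f := fun d p => fun x => x ++ [p.1]) (d := PySem.Dict.empty) PySem.Dict.nodup_keys_empty

lemma pv_getD_sortVals (d : PySem.Dict Int (List Int)) (hnd : d.keys.Nodup) (k : Int) :
    (fevA_sortVals d).getD k [] = PySem.List.sorted (d.getD k []) (fun y => y) false := by
  unfold fevA_sortVals
  rw [pv_getD_foldl_modify_once d.keys hnd d _ k]
  by_cases hk : k ∈ d.keys
  · simp [hk]
  · have hc : d.contains k = false := by
      cases h' : d.contains k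
      · rfl
      · exact absurd ((PySem.Dict.contains_iff_mem_keys d k).mp h') hk
    rw [if_neg hk, PySem.Dict.getD_of_not_contains d [] hc]
    exact ((PySem.List.sorted_eq_nil_iff _ _ _).mpr rfl).symm

lemma pv_getD_rowAppend (l : List (Int × Int)) (r : Int) :
    (fevA_rowAppend l).getD r [] = (l.filter (fun p => p.1 == r)).map (fun p => p.2) := by
  unfold fevA_rowAppend
  simpa using PySem.Dict.getD_foldl_modify_append l PySem.Dict.empty r

lemma pv_getD_colAppend (l : List (Int × Int)) (c : Int) :
    (fevA_colAppend l).getD c [] = (l.filter (fun p => p.2 == c)).map (fun p => p.1) := by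
  unfold fevA_colAppend
  have hswap : (l.foldl (fun d p => d.modify p.2 [] (fun x => x ++ [p.1])) PySem.Dict.empty)
      = ((l.map (fun p => (p.2, p.1))).foldl (fun d p => d.modify p.1 [] (fun x => x ++ [p.2])) PySem.Dict.empty) := by
    rw [List.foldl_map]
  rw [hswap, PySem.Dict.getD_foldl_modify_append]
  simp [List.filter_map, List.map_map, Function.comp_def]

lemma pv_mem_mirrorKeys (mirrors : List (Int × Int × String)) (p : Int × Int) :
    p ∈ (mirrors.foldl (fun d t => d.insert (t.1, t.2.1) t.2.2)
          (PySem.Dict.empty : PySem.Dict (Int × Int) String)).keys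
      ↔ p ∈ mirrors.map (fun t => (t.1, t.2.1)) := by
  rw [PySem.Dict.keys_foldl_insert_key mirrors (fun t => (t.1, t.2.1)) (fun d t => t.2.2)]
  simp [PySem.Set.mem_update]

-- A's sorted/bisect lookup of the first element beyond x equals B's min-beyond linear scan
lemma pv_nearest_up (L C : List Int) (x : Int) (h : ∀ a : Int, a ∈ L ↔ a ∈ C) :
    (if 0 ≤ ((PySem.List.bisectRight (PySem.List.sorted L (fun y => y) false) x : Int)) ∧
        ((PySem.List.bisectRight (PySem.List.sorted L (fun y => y) false) x : Int)) <
          PySem.List.len (PySem.List.sorted L (fun y => y) false)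
     then PySem.List.pyGet? (PySem.List.sorted L (fun y => y) false)
            ((PySem.List.bisectRight (PySem.List.sorted L (fun y => y) false) x : Int))
     else none)
    = PySem.List.min? (C.filter (fun p => decide (x < p))) (fun y => y) := by
  have hpw : (PySem.List.sorted L (fun y => y) false).Pairwise (· ≤ ·) := by
    simpa using PySem.List.sorted_pairwise (xs := L) (key := fun y => y)
  obtain ⟨hle, hlt, hgt⟩ := PySem.List.bisectRight_spec (PySem.List.sorted L (fun y => y) false) x hpw
  set S := PySem.List.sorted L (fun y => y) false with hS
  have hmemS : ∀ a : Int, a ∈ S ↔ a ∈ C := by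
    intro a; rw [hS, PySem.List.mem_sorted]; exact h a
  set k := PySem.List.bisectRight S x with hk
  have hmono : ∀ i j (hi : i < S.length) (hj : j < S.length), i ≤ j → S[i] ≤ S[j] := by
    intro i j hi hj hij
    rcases eq_or_lt_of_le hij with rfl | hij
    · exact le_rfl
    · exact (List.pairwise_iff_getElem.mp hpw) i j hi hj hij
  by_cases hklen : k < S.length
  · have hcond : (0:Int) ≤ (k:Int) ∧ (k:Int) < PySem.List.len S := by
      constructor
      · exact_mod_cast Nat.zero_le k
      · rw [PySem.List.len_eq]; exact_mod_cast hklen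
    rw [if_pos hcond, PySem.List.pyGet?_natCast, List.getElem?_eq_getElem hklen]
    have hxk : x < S[k] := hgt k hklen le_rfl
    have hSkC : S[k] ∈ C := (hmemS _).1 (List.getElem_mem _)
    have hSkF : S[k] ∈ C.filter (fun p => decide (x < p)) := by
      simp [List.mem_filter, hSkC, hxk]
    cases hmin : PySem.List.min? (C.filter (fun p => decide (x < p))) (fun y => y) with
    | none =>
      rw [PySem.List.min?_eq_none_iff] at hmin
      rw [hmin] at hSkF
      exact absurd hSkF (List.not_mem_nil)
    | some m =>
      have hmMem := PySem.List.min?_mem hmin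
      have hmMin := PySem.List.min?_isMin hmin
      have hmC : m ∈ C ∧ x < m := by simpa [List.mem_filter] using hmMem
      have hmS : m ∈ S := (hmemS m).2 hmC.1
      obtain ⟨j, hj, hjm⟩ := List.getElem_of_mem hmS
      have hkj : k ≤ j := by
        by_contra hlt'
        have := hlt j hj (by omega)
        rw [hjm] at this
        omega
      have h1 : S[k] ≤ m := hjm ▸ hmono k j hklen hj hkj
      have h2 : m ≤ S[k] := hmMin _ hSkF
      have : m = S[k] := le_antisymm h2 h1
      simp [this]
  · rw [if_neg (by
      rw [PySem.List.len_eq]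
      intro hcc
      exact hklen (by exact_mod_cast hcc.2))]
    symm
    rw [PySem.List.min?_eq_none_iff, List.filter_eq_nil_iff]
    intro a haC
    simp only [decide_eq_true_eq]
    intro hxa
    have haS : a ∈ S := (hmemS a).2 haC
    obtain ⟨j, hj, hja⟩ := List.getElem_of_mem haS
    have := hlt j hj (by omega)
    rw [hja] at this
    omega

-- the backward twin: bisect_left - 1 equals B's max-below linear scan
lemma pv_nearest_down (L C : List Int) (x : Int) (h : ∀ a : Int, a ∈ L ↔ a ∈ C) :
    (if 0 ≤ ((PySem.List.bisectLeft (PySem.List.sorted L (fun y => y) false) x : Int) - 1) ∧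
        ((PySem.List.bisectLeft (PySem.List.sorted L (fun y => y) false) x : Int) - 1) <
          PySem.List.len (PySem.List.sorted L (fun y => y) false)
     then PySem.List.pyGet? (PySem.List.sorted L (fun y => y) false)
            ((PySem.List.bisectLeft (PySem.List.sorted L (fun y => y) false) x : Int) - 1)
     else none)
    = PySem.List.max? (C.filter (fun p => decide (p < x))) (fun y => y) := by
  have hpw : (PySem.List.sorted L (fun y => y) false).Pairwise (· ≤ ·) := by
    simpa using PySem.List.sorted_pairwise (xs := L) (key := fun y => y)
  obtain ⟨hle, hlt, hge⟩ := PySem.List.bisectLeft_spec (PySem.List.sorted L (fun y => y) false) x hpw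
  set S := PySem.List.sorted L (fun y => y) false with hS
  have hmemS : ∀ a : Int, a ∈ S ↔ a ∈ C := by
    intro a; rw [hS, PySem.List.mem_sorted]; exact h a
  set b := PySem.List.bisectLeft S x with hb
  have hmono : ∀ i j (hi : i < S.length) (hj : j < S.length), i ≤ j → S[i] ≤ S[j] := by
    intro i j hi hj hij
    rcases eq_or_lt_of_le hij with rfl | hij
    · exact le_rfl
    · exact (List.pairwise_iff_getElem.mp hpw) i j hi hj hij
  by_cases hb0 : 1 ≤ b
  · have hblen : b - 1 < S.length := by omega
    have hcast : ((b:Int) - 1) = ((b - 1 : Nat) : Int) := by omega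
    have hcond : (0:Int) ≤ (b:Int) - 1 ∧ (b:Int) - 1 < PySem.List.len S := by
      rw [PySem.List.len_eq]
      constructor <;> [omega; (push_cast; omega)]
    rw [if_pos hcond, hcast, PySem.List.pyGet?_natCast, List.getElem?_eq_getElem hblen]
    have hxk : S[b-1] < x := hlt (b-1) hblen (by omega)
    have hSkC : S[b-1] ∈ C := (hmemS _).1 (List.getElem_mem _)
    have hSkF : S[b-1] ∈ C.filter (fun p => decide (p < x)) := by
      simp [List.mem_filter, hSkC, hxk]
    cases hmax : PySem.List.max? (C.filter (fun p => decide (p < x))) (fun y => y) with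
    | none =>
      rw [PySem.List.max?_eq_none_iff] at hmax
      rw [hmax] at hSkF
      exact absurd hSkF (List.not_mem_nil)
    | some m =>
      have hmMem := PySem.List.max?_mem hmax
      have hmMax := PySem.List.max?_isMax hmax
      have hmC : m ∈ C ∧ m < x := by simpa [List.mem_filter] using hmMem
      have hmS : m ∈ S := (hmemS m).2 hmC.1
      obtain ⟨j, hj, hjm⟩ := List.getElem_of_mem hmS
      have hkj : j ≤ b - 1 := by
        by_contra hlt'
        have := hge j hj (by omega)
        rw [hjm] at this
        omega
      have h1 : m ≤ S[b-1] := hjm ▸ hmono j (b-1) hj hblen hkj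
      have h2 : S[b-1] ≤ m := hmMax _ hSkF
      have : m = S[b-1] := le_antisymm h1 h2
      simp [this]
  · have hbz : b = 0 := by omega
    rw [if_neg (by
      intro hcc
      have := hcc.1
      omega)]
    symm
    rw [PySem.List.max?_eq_none_iff, List.filter_eq_nil_iff]
    intro a haC
    simp only [decide_eq_true_eq]
    intro hax
    have haS : a ∈ S := (hmemS a).2 haC
    obtain ⟨j, hj, hja⟩ := List.getElem_of_mem haS
    have := hge j hj (by omega)
    rw [hja] at this
    omega

-- the forward loop body of A in B's terms
lemma pv_dir_up (L M Cv Cm : List Int) (x : Int) (mkCell : Int → Int × Int) (dir : String)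
    (emb : PySem.Dict (Int × Int) (PySem.Set String))
    (hv : ∀ a : Int, a ∈ L ↔ a ∈ Cv) (hm : ∀ a : Int, a ∈ M ↔ a ∈ Cm) :
    fevA_dir (PySem.List.sorted L (fun y => y) false) (PySem.List.sorted M (fun y => y) false)
      x 1 mkCell dir emb
    = (match PySem.List.min? (Cv.filter (fun p => decide (x < p))) (fun y => y),
             PySem.List.min? (Cm.filter (fun p => decide (x < p))) (fun y => y) with
       | none, _ => emb
       | some vv, none => emb.modify (mkCell vv) PySem.Set.empty (fun s => PySem.Set.add s dir)
       | some vv, some mm =>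
           if vv < mm then emb.modify (mkCell vv) PySem.Set.empty (fun s => PySem.Set.add s dir)
           else emb) := by
  simp only [fevA_dir]
  simp only [if_true]
  rw [pv_nearest_up L Cv x hv, pv_nearest_up M Cm x hm]
  rcases PySem.List.min? (Cv.filter (fun p => decide (x < p))) (fun y => y) with _ | vv <;>
    rcases PySem.List.min? (Cm.filter (fun p => decide (x < p))) (fun y => y) with _ | mm <;>
    simp

-- the backward loop body of A in B's terms
lemma pv_dir_down (L M Cv Cm : List Int) (x : Int) (mkCell : Int → Int × Int) (dir : String)
    (emb : PySem.Dict (Int × Int) (PySem.Set String))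
    (hv : ∀ a : Int, a ∈ L ↔ a ∈ Cv) (hm : ∀ a : Int, a ∈ M ↔ a ∈ Cm) :
    fevA_dir (PySem.List.sorted L (fun y => y) false) (PySem.List.sorted M (fun y => y) false)
      x (-1) mkCell dir emb
    = (match PySem.List.max? (Cv.filter (fun p => decide (p < x))) (fun y => y),
             PySem.List.max? (Cm.filter (fun p => decide (p < x))) (fun y => y) with
       | none, _ => emb
       | some vv, none => emb.modify (mkCell vv) PySem.Set.empty (fun s => PySem.Set.add s dir)
       | some vv, some mm =>
           if mm < vv then emb.modify (mkCell vv) PySem.Set.empty (fun s => PySem.Set.add s dir)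
           else emb) := by
  simp only [fevA_dir]
  simp only [if_neg (show ¬ ((-1:Int) = 1) by norm_num)]
  rw [pv_nearest_down L Cv x hv, pv_nearest_down M Cm x hm]
  rcases PySem.List.max? (Cv.filter (fun p => decide (p < x))) (fun y => y) with _ | vv <;>
    rcases PySem.List.max? (Cm.filter (fun p => decide (p < x))) (fun y => y) with _ | mm <;>
    simp

-- B's step at each of the four directions, written as a match on the two scans
lemma pv_fevB_N (vampires : List (Int × Int)) (mirrors : List (Int × Int × String))
    (emb : PySem.Dict (Int × Int) (PySem.Set String)) (r c : Int) :
    fevB_step vampires mirrors emb ((r, c), "N")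
    = (match PySem.List.max? (((vampires.filter (fun p => p.2 == c)).map (fun p => p.1)).filter (fun p => decide (p < r))) (fun y => y),
             PySem.List.max? (((mirrors.filter (fun t => t.2.1 == c)).map (fun t => t.1)).filter (fun p => decide (p < r))) (fun y => y) with
       | none, _ => emb
       | some vv, none => emb.modify (vv, c) PySem.Set.empty (fun s => PySem.Set.add s "S")
       | some vv, some mm =>
           if mm < vv then emb.modify (vv, c) PySem.Set.empty (fun s => PySem.Set.add s "S")
           else emb) := by
  rcases hV : PySem.List.max? (((vampires.filter (fun p => p.2 == c)).map (fun p => p.1)).filter (fun p => decide (p < r))) (fun y => y) with _ | vv <;>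
    rcases hM : PySem.List.max? (((mirrors.filter (fun t => t.2.1 == c)).map (fun t => t.1)).filter (fun p => decide (p < r))) (fun y => y) with _ | mm <;>
    simp [fevB_step, fevB_opp, hV, hM]

lemma pv_fevB_S (vampires : List (Int × Int)) (mirrors : List (Int × Int × String))
    (emb : PySem.Dict (Int × Int) (PySem.Set String)) (r c : Int) :
    fevB_step vampires mirrors emb ((r, c), "S")
    = (match PySem.List.min? (((vampires.filter (fun p => p.2 == c)).map (fun p => p.1)).filter (fun p => decide (r < p))) (fun y => y),
             PySem.List.min? (((mirrors.filter (fun t => t.2.1 == c)).map (fun t => t.1)).filter (fun p => decide (r < p))) (fun y => y) with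
       | none, _ => emb
       | some vv, none => emb.modify (vv, c) PySem.Set.empty (fun s => PySem.Set.add s "N")
       | some vv, some mm =>
           if vv < mm then emb.modify (vv, c) PySem.Set.empty (fun s => PySem.Set.add s "N")
           else emb) := by
  rcases hV : PySem.List.min? (((vampires.filter (fun p => p.2 == c)).map (fun p => p.1)).filter (fun p => decide (r < p))) (fun y => y) with _ | vv <;>
    rcases hM : PySem.List.min? (((mirrors.filter (fun t => t.2.1 == c)).map (fun t => t.1)).filter (fun p => decide (r < p))) (fun y => y) with _ | mm <;>
    simp [fevB_step, fevB_opp, hV, hM]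

lemma pv_fevB_W (vampires : List (Int × Int)) (mirrors : List (Int × Int × String))
    (emb : PySem.Dict (Int × Int) (PySem.Set String)) (r c : Int) :
    fevB_step vampires mirrors emb ((r, c), "W")
    = (match PySem.List.max? (((vampires.filter (fun p => p.1 == r)).map (fun p => p.2)).filter (fun p => decide (p < c))) (fun y => y),
             PySem.List.max? (((mirrors.filter (fun t => t.1 == r)).map (fun t => t.2.1)).filter (fun p => decide (p < c))) (fun y => y) with
       | none, _ => emb
       | some vv, none => emb.modify (r, vv) PySem.Set.empty (fun s => PySem.Set.add s "E")
       | some vv, some mm =>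
           if mm < vv then emb.modify (r, vv) PySem.Set.empty (fun s => PySem.Set.add s "E")
           else emb) := by
  rcases hV : PySem.List.max? (((vampires.filter (fun p => p.1 == r)).map (fun p => p.2)).filter (fun p => decide (p < c))) (fun y => y) with _ | vv <;>
    rcases hM : PySem.List.max? (((mirrors.filter (fun t => t.1 == r)).map (fun t => t.2.1)).filter (fun p => decide (p < c))) (fun y => y) with _ | mm <;>
    simp [fevB_step, fevB_opp, hV, hM]

lemma pv_fevB_E (vampires : List (Int × Int)) (mirrors : List (Int × Int × String))
    (emb : PySem.Dict (Int × Int) (PySem.Set String)) (r c : Int) :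
    fevB_step vampires mirrors emb ((r, c), "E")
    = (match PySem.List.min? (((vampires.filter (fun p => p.1 == r)).map (fun p => p.2)).filter (fun p => decide (c < p))) (fun y => y),
             PySem.List.min? (((mirrors.filter (fun t => t.1 == r)).map (fun t => t.2.1)).filter (fun p => decide (c < p))) (fun y => y) with
       | none, _ => emb
       | some vv, none => emb.modify (r, vv) PySem.Set.empty (fun s => PySem.Set.add s "W")
       | some vv, some mm =>
           if vv < mm then emb.modify (r, vv) PySem.Set.empty (fun s => PySem.Set.add s "W")
           else emb) := by
  rcases hV : PySem.List.min? (((vampires.filter (fun p => p.1 == r)).map (fun p => p.2)).filter (fun p => decide (c < p))) (fun y => y) with _ | vv <;>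
    rcases hM : PySem.List.min? (((mirrors.filter (fun t => t.1 == r)).map (fun t => t.2.1)).filter (fun p => decide (c < p))) (fun y => y) with _ | mm <;>
    simp [fevB_step, fevB_opp, hV, hM]

-- on an unknown direction both loop bodies skip the entry (Python raises there; outside Pre_)
lemma pv_fevB_other (vampires : List (Int × Int)) (mirrors : List (Int × Int × String))
    (emb : PySem.Dict (Int × Int) (PySem.Set String)) (r c : Int) (d : String)
    (hN : d ≠ "N") (hS : d ≠ "S") (hE : d ≠ "E") (hW : d ≠ "W") :
    fevB_step vampires mirrors emb ((r, c), d) = emb := by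
  have hopp : fevB_opp d = none := by simp [fevB_opp, hN, hS, hE, hW]
  simp [fevB_step, hopp]

-- membership bridges: A's per-row/col lists hold the same integers as B's candidate lists
lemma pv_mem_rowV (vampires : List (Int × Int)) (r : Int) (a : Int) :
    a ∈ (fevA_rowAppend (PySem.Set.ofList vampires)).getD r []
      ↔ a ∈ (vampires.filter (fun p => p.1 == r)).map (fun p => p.2) := by
  rw [pv_getD_rowAppend]
  simp [List.mem_map, List.mem_filter, PySem.Set.mem_ofList]

lemma pv_mem_colV (vampires : List (Int × Int)) (c : Int) (a : Int) :
    a ∈ (fevA_colAppend (PySem.Set.ofList vampires)).getD c []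
      ↔ a ∈ (vampires.filter (fun p => p.2 == c)).map (fun p => p.1) := by
  rw [pv_getD_colAppend]
  simp [List.mem_map, List.mem_filter, PySem.Set.mem_ofList]

lemma pv_mem_rowM (mirrors : List (Int × Int × String)) (r : Int) (a : Int) :
    a ∈ (fevA_rowAppend (mirrors.foldl (fun d t => d.insert (t.1, t.2.1) t.2.2)
          (PySem.Dict.empty : PySem.Dict (Int × Int) String)).keys).getD r []
      ↔ a ∈ (mirrors.filter (fun t => t.1 == r)).map (fun t => t.2.1) := by
  rw [pv_getD_rowAppend]
  simp only [List.mem_map, List.mem_filter, pv_mem_mirrorKeys, beq_iff_eq]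
  constructor
  · rintro ⟨p, ⟨⟨t, ht, rfl⟩, hpr⟩, hpa⟩
    exact ⟨t, ⟨ht, hpr⟩, hpa⟩
  · rintro ⟨t, ⟨ht, htr⟩, hta⟩
    exact ⟨(t.1, t.2.1), ⟨⟨t, ht, rfl⟩, htr⟩, hta⟩

lemma pv_mem_colM (mirrors : List (Int × Int × String)) (c : Int) (a : Int) :
    a ∈ (fevA_colAppend (mirrors.foldl (fun d t => d.insert (t.1, t.2.1) t.2.2)
          (PySem.Dict.empty : PySem.Dict (Int × Int) String)).keys).getD c []
      ↔ a ∈ (mirrors.filter (fun t => t.2.1 == c)).map (fun t => t.1) := by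
  rw [pv_getD_colAppend]
  simp only [List.mem_map, List.mem_filter, pv_mem_mirrorKeys, beq_iff_eq]
  constructor
  · rintro ⟨p, ⟨⟨t, ht, rfl⟩, hpc⟩, hpa⟩
    exact ⟨t, ⟨ht, hpc⟩, hpa⟩
  · rintro ⟨t, ⟨ht, htc⟩, hta⟩
    exact ⟨(t.1, t.2.1), ⟨⟨t, ht, rfl⟩, htc⟩, hta⟩

-- A's per-mirror step equals B's per-mirror step, for every entry and accumulator
lemma pv_step_eq (vampires : List (Int × Int)) (mirrors : List (Int × Int × String))
    (emb : PySem.Dict (Int × Int) (PySem.Set String)) (e : (Int × Int) × String) :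
    fevA_step
      (fevA_sortVals (fevA_rowAppend (PySem.Set.ofList vampires)))
      (fevA_sortVals (fevA_rowAppend (mirrors.foldl (fun d t => d.insert (t.1, t.2.1) t.2.2)
        (PySem.Dict.empty : PySem.Dict (Int × Int) String)).keys))
      (fevA_sortVals (fevA_colAppend (PySem.Set.ofList vampires)))
      (fevA_sortVals (fevA_colAppend (mirrors.foldl (fun d t => d.insert (t.1, t.2.1) t.2.2)
        (PySem.Dict.empty : PySem.Dict (Int × Int) String)).keys))
      emb e
    = fevB_step vampires mirrors emb e := by
  rcases e with ⟨⟨r, c⟩, d⟩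
  by_cases hN : d = "N"
  · subst hN
    simp only [fevA_step]
    rw [if_pos trivial]
    rw [pv_getD_sortVals _ (pv_nodup_keys_colAppend _) c, pv_getD_sortVals _ (pv_nodup_keys_colAppend _) c]
    rw [pv_dir_down _ _ _ _ r (fun vp => (vp, c)) "S" emb (pv_mem_colV vampires c) (pv_mem_colM mirrors c)]
    rw [pv_fevB_N]
  · by_cases hS : d = "S"
    · subst hS
      simp only [fevA_step]
      rw [if_neg (by decide), if_pos trivial]
      rw [pv_getD_sortVals _ (pv_nodup_keys_colAppend _) c, pv_getD_sortVals _ (pv_nodup_keys_colAppend _) c]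
      rw [pv_dir_up _ _ _ _ r (fun vp => (vp, c)) "N" emb (pv_mem_colV vampires c) (pv_mem_colM mirrors c)]
      rw [pv_fevB_S]
    · by_cases hW : d = "W"
      · subst hW
        simp only [fevA_step]
        rw [if_neg (by decide), if_neg (by decide), if_pos trivial]
        rw [pv_getD_sortVals _ (pv_nodup_keys_rowAppend _) r, pv_getD_sortVals _ (pv_nodup_keys_rowAppend _) r]
        rw [pv_dir_down _ _ _ _ c (fun vp => (r, vp)) "E" emb (pv_mem_rowV vampires r) (pv_mem_rowM mirrors r)]
        rw [pv_fevB_W]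
      · by_cases hE : d = "E"
        · subst hE
          simp only [fevA_step]
          rw [if_neg (by decide), if_neg (by decide), if_neg (by decide), if_pos trivial]
          rw [pv_getD_sortVals _ (pv_nodup_keys_rowAppend _) r, pv_getD_sortVals _ (pv_nodup_keys_rowAppend _) r]
          rw [pv_dir_up _ _ _ _ c (fun vp => (r, vp)) "W" emb (pv_mem_rowV vampires r) (pv_mem_rowM mirrors r)]
          rw [pv_fevB_E]
        · simp only [fevA_step]
          rw [if_neg hN, if_neg hS, if_neg hW, if_neg hE]
          rw [pv_fevB_other vampires mirrors emb r c d hN hS hE hW]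

-- ===== VERDICT (by name: the statement is the Claim_ definition above) =====
theorem find_embarrassed_vampires_fast_spec : Claim_equal_find_embarrassed_vampires_fast := by
  intro vampires mirrors rows cols hdom hpre
  unfold Spec_find_embarrassed_vampires_fast
  unfold find_embarrassed_vampires_fast find_embarrassed_vampires_fast_alt
  dsimp only
  have hfold :
      List.foldl (fevA_step
        (fevA_sortVals (fevA_rowAppend (PySem.Set.ofList vampires)))
        (fevA_sortVals (fevA_rowAppend (mirrors.foldl (fun d t => d.insert (t.1, t.2.1) t.2.2)
          (PySem.Dict.empty : PySem.Dict (Int × Int) String)).keys))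
        (fevA_sortVals (fevA_colAppend (PySem.Set.ofList vampires)))
        (fevA_sortVals (fevA_colAppend (mirrors.foldl (fun d t => d.insert (t.1, t.2.1) t.2.2)
          (PySem.Dict.empty : PySem.Dict (Int × Int) String)).keys)))
        (PySem.Dict.empty : PySem.Dict (Int × Int) (PySem.Set String))
        (mirrors.foldl (fun d t => d.insert (t.1, t.2.1) t.2.2)
          (PySem.Dict.empty : PySem.Dict (Int × Int) String)).items
      = List.foldl (fevB_step vampires mirrors)
        (PySem.Dict.empty : PySem.Dict (Int × Int) (PySem.Set String))
        (mirrors.foldl (fun d t => d.insert (t.1, t.2.1) t.2.2)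
          (PySem.Dict.empty : PySem.Dict (Int × Int) String)).items :=
    PySem.List.foldl_congr_mem _ _ _ _ (fun acc x _ => pv_step_eq vampires mirrors acc x)
  rw [hfold]
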